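-- pv_equiv track=rewrite | github.com/yksun/TACO | taco/telomere_detect.py | canonicalize_kmer
-- ===== SOURCE A (Python) =====
-- def revcomp(seq):
--     """Return reverse complement of a DNA sequence."""
--     table = str.maketrans("ACGTacgtNn", "TGCAtgcaNn")
--     return seq.translate(table)[::-1]
--
-- def canonicalize_kmer(kmer):
--     """Return the canonical form of a k-mer (min of all rotations of fwd+rev)."""
--     rc = revcomp(kmer)
--     candidates = []
--     for x in (kmer, rc):
--         doubled = x + x
--         for i in range(len(x)):
--             candidates.append(doubled[i:i + len(x)])
--     return min(candidates)
-- ===== SOURCE B (Python) =====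
-- _COMP = {"A": "T", "C": "G", "G": "C", "T": "A",
--          "a": "t", "c": "g", "g": "c", "t": "a",
--          "N": "N", "n": "n"}
--
--
-- def _least_rot(s):
--     """Smallest rotation of s: rotate one char at a time, keep the running min."""
--     best = cur = s
--     for _ in range(len(s) - 1):
--         cur = cur[1:] + cur[:1]
--         if cur < best:
--             best = cur
--     return best
--
--
-- def canonicalize_kmer(kmer):
--     """Return the canonical form of a k-mer (min of all rotations of fwd+rev)."""
--     rc = "".join(_COMP.get(c, c) for c in reversed(kmer))
--     return min(_least_rot(kmer), _least_rot(rc))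
-- ===== Notes on version B (the rewrite author's own statement) =====
-- stated objective: alternative
-- what changed: Instead of building a doubled string and a list of all 2k rotation slices and calling min on it, B rotates the string one character at a time keeping only a running minimum (the two per-strand minima are combined with a two-argument min); no candidate list or doubled string is ever materialised (O(k) extra space instead of O(k^2)).
import Mathlib
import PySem

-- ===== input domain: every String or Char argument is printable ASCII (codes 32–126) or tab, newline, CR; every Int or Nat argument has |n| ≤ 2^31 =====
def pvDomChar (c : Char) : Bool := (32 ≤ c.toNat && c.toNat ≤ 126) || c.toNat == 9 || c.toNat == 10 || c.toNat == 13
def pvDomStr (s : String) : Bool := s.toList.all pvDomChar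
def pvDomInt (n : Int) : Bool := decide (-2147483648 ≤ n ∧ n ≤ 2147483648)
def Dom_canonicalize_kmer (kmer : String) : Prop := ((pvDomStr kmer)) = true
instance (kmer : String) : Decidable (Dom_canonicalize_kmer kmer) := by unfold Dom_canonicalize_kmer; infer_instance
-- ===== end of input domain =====

-- B replaces A's doubled string and materialised 2k-slice candidate list by rotating one
-- character at a time with a running minimum (alternative decomposition, O(k) extra space).

-- ===== PORT A =====
-- str.maketrans("ACGTacgtNn", "TGCAtgcaNn"); str.translate maps untabled characters to themselves
def pvTableA (c : Char) : Char :=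
  if c = 'A' then 'T' else if c = 'C' then 'G' else if c = 'G' then 'C' else if c = 'T' then 'A'
  else if c = 'a' then 't' else if c = 'c' then 'g' else if c = 'g' then 'c' else if c = 't' then 'a'
  else if c = 'N' then 'N' else if c = 'n' then 'n' else c

-- revcomp: seq.translate(table)[::-1]; [::-1] is reversal (PySem.List.slice?_none_none_neg_one)
def pvRevcompA (seq : String) : List Char := (seq.toList.map pvTableA).reverse

def canonicalize_kmer (kmer : String) : String :=
  let rc := pvRevcompA kmer
  let candidates : List (List Char) :=
    [kmer.toList, rc].foldl (fun cands x =>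
      let doubled := x ++ x
      (PySem.List.pyRange 0 (x.length : Int) 1).foldl
        (fun cands i =>
          cands ++ [PySem.List.slice doubled (some i) (some (i + (x.length : Int)))])
        cands) []
  -- min(candidates): none = ValueError on the empty k-mer, excluded by Pre_
  String.ofList ((PySem.List.min? candidates (fun y => y)).getD [])

-- ===== PORT B =====
-- the module-level dict _COMP
def pvCompDict : PySem.Dict Char Char :=
  PySem.Dict.ofList [('A', 'T'), ('C', 'G'), ('G', 'C'), ('T', 'A'),
                     ('a', 't'), ('c', 'g'), ('g', 'c'), ('t', 'a'),
                     ('N', 'N'), ('n', 'n')]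

-- _COMP.get(c, c)
def pvCompB (c : Char) : Char := (PySem.Dict.get? pvCompDict c).getD c

-- cur = cur[1:] + cur[:1]  (s[1:] is tail, s[:1] is take 1: PySem.List.slice_from_one/slice_to)
def pvRotOnce (l : List Char) : List Char := l.tail ++ l.take 1

-- one loop iteration of _least_rot: state (best, cur)
def pvStep (st : List Char × List Char) : List Char × List Char :=
  let cur := pvRotOnce st.2
  (if cur < st.1 then cur else st.1, cur)

-- _least_rot: best = cur = s; for _ in range(len(s)-1): …
def pvLeastRot (s : List Char) : List Char :=
  ((PySem.List.pyRange 0 ((s.length : Int) - 1) 1).foldl (fun st _ => pvStep st) (s, s)).1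

def canonicalize_kmer_alt (kmer : String) : String :=
  let rc := kmer.toList.reverse.map pvCompB
  -- Python's two-argument min returns the (unique) smaller value on a total order
  String.ofList (min (pvLeastRot kmer.toList) (pvLeastRot rc))

-- ===== PRECONDITION & SPEC =====
-- Pre_ excludes only the empty k-mer, on which A raises ValueError (min of an empty list).
def Pre_canonicalize_kmer (kmer : String) : Prop := kmer ≠ ""
instance (kmer : String) : Decidable (Pre_canonicalize_kmer kmer) := by
  unfold Pre_canonicalize_kmer; infer_instance

def pvWitness_canonicalize_kmer : String := "ACGTn"

def Spec_canonicalize_kmer (kmer : String) (out : String) : Prop := out = canonicalize_kmer_alt kmer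
instance (kmer : String) (out : String) : Decidable (Spec_canonicalize_kmer kmer out) := by
  unfold Spec_canonicalize_kmer; infer_instance

-- ===== CLAIM (what is proved, stated in full; the proofs are below) =====
def Claim_equal_canonicalize_kmer : Prop := ∀ (kmer : String), Dom_canonicalize_kmer kmer → Pre_canonicalize_kmer kmer → Spec_canonicalize_kmer kmer (canonicalize_kmer kmer)

-- ===== LEMMAS AND PROOFS =====

-- the i-th rotation of s
def pvRot (i : Nat) (s : List Char) : List Char := s.drop i ++ s.take i

-- all rotations of s
def pvRots (s : List Char) : List (List Char) := (List.range s.length).map (fun i => pvRot i s)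

theorem pvRot_zero (s : List Char) : pvRot 0 s = s := by simp [pvRot]

theorem pyRange_zero_natCast (k : Nat) :
    PySem.List.pyRange 0 (k : Int) 1 = (List.range k).map Int.ofNat := by
  induction k with
  | zero =>
    apply List.eq_nil_of_length_eq_zero
    rw [PySem.List.length_pyRange_one]
    omega
  | succ k ih =>
    have hcast : ((k + 1 : Nat) : Int) = (k : Int) + 1 := by push_cast; ring
    have hnil : PySem.List.pyRange ((k : Int) + 1) ((k : Int) + 1) 1 = [] := by
      apply List.eq_nil_of_length_eq_zero
      rw [PySem.List.length_pyRange_one]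
      omega
    rw [hcast, PySem.List.pyRange_one_append 0 (k : Int) ((k : Int) + 1)
        (by positivity) (by omega), ih,
      PySem.List.pyRange_one_cons (by omega), hnil, List.range_succ]
    simp

theorem foldl_snoc {α β : Type} (f : α → β) (l : List α) (acc : List β) :
    l.foldl (fun a x => a ++ [f x]) acc = acc ++ l.map f := by
  induction l generalizing acc with
  | nil => simp
  | cons x t ih => simp [List.foldl_cons, ih]

theorem slice_doubled (s : List Char) (i : Nat) (h : i ≤ s.length) :
    PySem.List.slice (s ++ s) (some (i : Int)) (some ((i : Int) + (s.length : Int))) =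
      pvRot i s := by
  rw [PySem.List.slice_natCast_add (s ++ s) i s.length,
    List.drop_append_of_le_length h, List.take_append,
    List.take_of_length_le (by rw [List.length_drop]; omega)]
  have hlen : s.length - (s.drop i).length = i := by rw [List.length_drop]; omega
  rw [hlen]
  rfl

-- A's candidate list is exactly the rotations of kmer followed by the rotations of rc
theorem candidates_eq (x y : List Char) :
    [x, y].foldl (fun cands z =>
      let doubled := z ++ z
      (PySem.List.pyRange 0 (z.length : Int) 1).foldl
        (fun cands i =>
          cands ++ [PySem.List.slice doubled (some i) (some (i + (z.length : Int)))])
        cands) ([] : List (List Char)) = pvRots x ++ pvRots y := by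
  have key : ∀ (z : List Char) (acc : List (List Char)),
      (PySem.List.pyRange 0 (z.length : Int) 1).foldl
        (fun cands i =>
          cands ++ [PySem.List.slice (z ++ z) (some i) (some (i + (z.length : Int)))])
        acc = acc ++ pvRots z := by
    intro z acc
    rw [foldl_snoc, pyRange_zero_natCast, List.map_map]
    congr 1
    unfold pvRots
    apply List.map_congr_left
    intro i hi
    have hi' : i < z.length := List.mem_range.mp hi
    exact slice_doubled z i (le_of_lt hi')
  simp only [List.foldl_cons, List.foldl_nil]
  rw [key, key]
  simp

theorem rotOnce_rot (s : List Char) (i : Nat) (h : i < s.length) :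
    pvRotOnce (pvRot i s) = pvRot (i + 1) s := by
  have hd : s.drop i = s[i] :: s.drop (i + 1) := List.drop_eq_getElem_cons h
  unfold pvRotOnce pvRot
  rw [hd]
  simp only [List.cons_append, List.tail_cons]
  rw [show List.take 1 (s[i] :: (List.drop (i + 1) s ++ List.take i s)) = [s[i]] from rfl]
  have : s.take (i + 1) = s.take i ++ [s[i]] := by
    rw [List.take_add_one]
    simp [List.getElem?_eq_getElem h]
  rw [this, List.append_assoc]

theorem iter_spec (s : List Char) (t : Nat) (ht : t + 1 ≤ s.length) :
    (pvStep^[t] (s, s)).2 = pvRot t s ∧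
    (∃ j, j ≤ t ∧ (pvStep^[t] (s, s)).1 = pvRot j s) ∧
    (∀ i, i ≤ t → (pvStep^[t] (s, s)).1 ≤ pvRot i s) := by
  induction t with
  | zero =>
    refine ⟨by simp [pvRot_zero], ⟨0, le_refl 0, by simp [pvRot_zero]⟩, ?_⟩
    intro i hi
    simp [Nat.le_zero.mp hi, pvRot_zero]
  | succ t ih =>
    obtain ⟨h2, ⟨j, hj, hj2⟩, hmin⟩ := ih (by omega)
    rw [Function.iterate_succ_apply']
    have hcur : pvRotOnce (pvStep^[t] (s, s)).2 = pvRot (t + 1) s := by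
      rw [h2]; exact rotOnce_rot s t (by omega)
    refine ⟨?_, ?_, ?_⟩
    · simp only [pvStep, hcur]
    · simp only [pvStep, hcur]
      split
      · exact ⟨t + 1, le_refl _, rfl⟩
      · exact ⟨j, by omega, hj2⟩
    · intro i hi
      simp only [pvStep, hcur]
      rcases Nat.lt_or_ge i (t + 1) with hlt | hge
      · have h1 := hmin i (by omega)
        split
        · exact le_trans (le_of_lt (by assumption)) h1
        · exact h1
      · have : i = t + 1 := by omega
        subst this
        split
        · exact le_refl _
        · exact le_of_not_gt (by assumption)

-- A's translation table and B's _COMP dict perform the same character substitution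
theorem pvTableA_eq_pvCompB : pvTableA = pvCompB := by
  funext c
  by_cases h1 : c = 'A'; · subst h1; decide
  by_cases h2 : c = 'C'; · subst h2; decide
  by_cases h3 : c = 'G'; · subst h3; decide
  by_cases h4 : c = 'T'; · subst h4; decide
  by_cases h5 : c = 'a'; · subst h5; decide
  by_cases h6 : c = 'c'; · subst h6; decide
  by_cases h7 : c = 'g'; · subst h7; decide
  by_cases h8 : c = 't'; · subst h8; decide
  by_cases h9 : c = 'N'; · subst h9; decide
  by_cases h10 : c = 'n'; · subst h10; decide
  have g1 : ('A' == c) = false := by simp; exact fun h => h1 h.symm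
  have g2 : ('C' == c) = false := by simp; exact fun h => h2 h.symm
  have g3 : ('G' == c) = false := by simp; exact fun h => h3 h.symm
  have g4 : ('T' == c) = false := by simp; exact fun h => h4 h.symm
  have g5 : ('a' == c) = false := by simp; exact fun h => h5 h.symm
  have g6 : ('c' == c) = false := by simp; exact fun h => h6 h.symm
  have g7 : ('g' == c) = false := by simp; exact fun h => h7 h.symm
  have g8 : ('t' == c) = false := by simp; exact fun h => h8 h.symm
  have g9 : ('N' == c) = false := by simp; exact fun h => h9 h.symm
  have g10 : ('n' == c) = false := by simp; exact fun h => h10 h.symm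
  simp [pvTableA, pvCompB, pvCompDict, PySem.Dict.get?, PySem.Dict.ofList, PySem.Dict.update,
    PySem.Dict.empty, PySem.Dict.insert, h1, h2, h3, h4, h5, h6, h7, h8, h9, h10,
    g1, g2, g3, g4, g5, g6, g7, g8, g9, g10]

theorem mem_pvRots {s y : List Char} : y ∈ pvRots s ↔ ∃ i, i < s.length ∧ y = pvRot i s := by
  unfold pvRots
  simp only [List.mem_map, List.mem_range]
  constructor
  · rintro ⟨i, hi, rfl⟩; exact ⟨i, hi, rfl⟩
  · rintro ⟨i, hi, rfl⟩; exact ⟨i, hi, rfl⟩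

theorem leastRot_spec (s : List Char) (hs : s ≠ []) :
    pvLeastRot s ∈ pvRots s ∧ ∀ y ∈ pvRots s, pvLeastRot s ≤ y := by
  have hlen : 1 ≤ s.length := by
    cases s with
    | nil => exact absurd rfl hs
    | cons a t => simp
  have hfold : pvLeastRot s = (pvStep^[s.length - 1] (s, s)).1 := by
    unfold pvLeastRot
    have hconst : ∀ (l : List Int) (init : List Char × List Char),
        l.foldl (fun st _ => pvStep st) init = pvStep^[l.length] init := by
      intro l
      induction l with
      | nil => intro init; simp
      | cons x t ih =>
        intro init
        simp only [List.foldl_cons, List.length_cons, ih,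
          Function.iterate_succ_apply]
    have hlen2 : ((PySem.List.pyRange 0 ((s.length : Int) - 1) 1)).length = s.length - 1 := by
      rw [PySem.List.length_pyRange_one]
      omega
    rw [hconst, hlen2]
  obtain ⟨_, ⟨j, hj, hj2⟩, hmin⟩ := iter_spec s (s.length - 1) (by omega)
  constructor
  · rw [hfold, hj2]
    exact mem_pvRots.mpr ⟨j, by omega, rfl⟩
  · intro y hy
    obtain ⟨i, hi, rfl⟩ := mem_pvRots.mp hy
    rw [hfold]
    exact hmin i (by omega)

-- ===== VERDICT (by name: the statement is the Claim_ definition above) =====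
theorem canonicalize_kmer_spec : Claim_equal_canonicalize_kmer := by
  intro kmer _ hpre
  unfold Spec_canonicalize_kmer canonicalize_kmer canonicalize_kmer_alt
  have hk : kmer.toList ≠ [] := by
    intro h
    exact hpre (String.toList_eq_nil_iff.mp h)
  have hcompeq : pvTableA = pvCompB := pvTableA_eq_pvCompB
  have hrc : pvRevcompA kmer = kmer.toList.reverse.map pvCompB := by
    unfold pvRevcompA
    rw [hcompeq, List.map_reverse]
  set rc := kmer.toList.reverse.map pvCompB with hrcdef
  have hrcne : rc ≠ [] := by
    intro h
    have := congrArg List.length h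
    simp [hrcdef] at this
    exact hpre this
  simp only [hrc, candidates_eq]
  -- both sides compute the unique minimum of pvRots kmer.toList ++ pvRots rc
  obtain ⟨hm1, hm2⟩ := leastRot_spec kmer.toList hk
  obtain ⟨hr1, hr2⟩ := leastRot_spec rc hrcne
  have hne : pvRots kmer.toList ++ pvRots rc ≠ [] := by
    intro h
    rcases List.append_eq_nil_iff.mp h with ⟨h1, _⟩
    rw [h1] at hm1
    exact absurd hm1 (List.not_mem_nil)
  obtain ⟨m, hm⟩ : ∃ m, PySem.List.min? (pvRots kmer.toList ++ pvRots rc) (fun y => y) = some m := by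
    cases hcase : PySem.List.min? (pvRots kmer.toList ++ pvRots rc) (fun y => y) with
    | none => exact absurd ((PySem.List.min?_eq_none_iff _ _).mp hcase) hne
    | some m => exact ⟨m, rfl⟩
  have hinst : (fun (a b : List Char) => a.decidableLT b) =
      (LinearOrder.toDecidableLT : DecidableLT (List Char)) := by
    funext a b; exact Subsingleton.elim _ _
  have hm' := hm
  rw [hinst] at hm'
  have hmmem : m ∈ pvRots kmer.toList ++ pvRots rc := PySem.List.min?_mem hm
  have hmle : ∀ y ∈ pvRots kmer.toList ++ pvRots rc, m ≤ y := by
    intro y hy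
    exact PySem.List.min?_isMin hm' y hy
  set b := min (pvLeastRot kmer.toList) (pvLeastRot rc) with hbdef
  have hbm : b ∈ pvRots kmer.toList ++ pvRots rc := by
    rcases min_cases (pvLeastRot kmer.toList) (pvLeastRot rc) with ⟨h, _⟩ | ⟨h, _⟩
    · rw [hbdef, h]; exact List.mem_append.mpr (Or.inl hm1)
    · rw [hbdef, h]; exact List.mem_append.mpr (Or.inr hr1)
  have hble : b ≤ m := by
    rcases List.mem_append.mp hmmem with h | h
    · exact le_trans (min_le_left _ _) (hm2 m h)
    · exact le_trans (min_le_right _ _) (hr2 m h)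
  have heq : m = b := le_antisymm (hmle b hbm) hble
  rw [hm]
  simp [heq]
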